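-- pv_equiv track=rewrite | github.com/JhonatanUscca/Seg.-en-Computaci-n | atabash.py | cifrar_atbash
-- ===== SOURCE A (Python) =====
-- def cifrar_atbash(mensaje):
--     alfabeto_minuscula = "abcdefghijklmnopqrstuvwxyz"
--     alfabeto_mayuscula = "ABCDEFGHIJKLMNOPQRSTUVWXYZ"
--
--     invertido_minus = alfabeto_minuscula[::-1]
--     invertido_mayus = alfabeto_mayuscula[::-1]
--
--     diccionario_crifrado = {}
--     for i in range(26):
--         diccionario_crifrado[alfabeto_minuscula[i]] = invertido_minus[i]
--         diccionario_crifrado[alfabeto_mayuscula[i]] = invertido_mayus[i]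
--
--     mensaje_cifrado = ""
--     for letra in mensaje:
--         mensaje_cifrado += diccionario_crifrado.get(letra, letra)
--
--     return mensaje_cifrado
-- ===== SOURCE B (Python) =====
-- def cifrar_atbash(mensaje):
--     return ''.join(
--         chr(ord('a') + ord('z') - ord(c)) if 'a' <= c <= 'z'
--         else chr(ord('A') + ord('Z') - ord(c)) if 'A' <= c <= 'Z'
--         else c
--         for c in mensaje)
-- ===== Notes on version B (the rewrite author's own statement) =====
-- stated objective: idiomatic
-- what changed: Replaced the precomputed 52-entry substitution dictionary and string-concatenation loop with a closed-form arithmetic mirror per character joined via str.join over a generator.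
import Mathlib
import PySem

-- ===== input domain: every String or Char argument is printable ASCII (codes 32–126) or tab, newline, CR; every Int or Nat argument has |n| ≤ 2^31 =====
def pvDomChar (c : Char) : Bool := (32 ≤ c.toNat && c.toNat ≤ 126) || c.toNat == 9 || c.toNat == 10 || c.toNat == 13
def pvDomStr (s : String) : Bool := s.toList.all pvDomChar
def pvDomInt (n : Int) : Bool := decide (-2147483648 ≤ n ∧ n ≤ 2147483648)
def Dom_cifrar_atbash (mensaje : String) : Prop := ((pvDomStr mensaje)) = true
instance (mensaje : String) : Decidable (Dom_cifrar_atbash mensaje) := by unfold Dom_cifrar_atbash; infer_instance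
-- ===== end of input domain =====

-- B replaces A's precomputed 52-entry substitution dictionary with a per-character arithmetic mirror (idiomatic).

-- ===== PORT A =====
-- Python strings are modelled as List Char, so the 1-char strings A manipulates become Chars.
-- The loop indices 0..25 are always in range, so pyGetD's default ' ' is never used.
def cifrar_atbash (mensaje : String) : String :=
  let alfabeto_minuscula := "abcdefghijklmnopqrstuvwxyz".toList
  let alfabeto_mayuscula := "ABCDEFGHIJKLMNOPQRSTUVWXYZ".toList
  let invertido_minus := (PySem.List.slice? alfabeto_minuscula none none (-1)).getD []
  let invertido_mayus := (PySem.List.slice? alfabeto_mayuscula none none (-1)).getD []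
  let diccionario_crifrado : PySem.Dict Char Char :=
    (PySem.List.pyRange 0 26 1).foldl (fun d i =>
      (d.insert (PySem.List.pyGetD alfabeto_minuscula i ' ') (PySem.List.pyGetD invertido_minus i ' ')).insert
        (PySem.List.pyGetD alfabeto_mayuscula i ' ') (PySem.List.pyGetD invertido_mayus i ' '))
      PySem.Dict.empty
  let mensaje_cifrado :=
    mensaje.toList.foldl (fun acc letra => acc ++ [diccionario_crifrado.getD letra letra]) ([] : List Char)
  String.ofList mensaje_cifrado

-- ===== PORT B =====
def atbashChar (c : Char) : Char :=
  if 'a' ≤ c ∧ c ≤ 'z' then Char.ofNat ('a'.toNat + 'z'.toNat - c.toNat)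
  else if 'A' ≤ c ∧ c ≤ 'Z' then Char.ofNat ('A'.toNat + 'Z'.toNat - c.toNat)
  else c

def cifrar_atbash_alt (mensaje : String) : String :=
  String.ofList (mensaje.toList.map atbashChar)

-- ===== PRECONDITION & SPEC =====
def Spec_cifrar_atbash (mensaje : String) (out : String) : Prop := out = cifrar_atbash_alt mensaje
instance (mensaje : String) (out : String) : Decidable (Spec_cifrar_atbash mensaje out) := by unfold Spec_cifrar_atbash; infer_instance

-- ===== CLAIM (what is proved, stated in full; the proofs are below) =====
def Claim_equal_cifrar_atbash : Prop := ∀ (mensaje : String), Dom_cifrar_atbash mensaje → Spec_cifrar_atbash mensaje (cifrar_atbash mensaje)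

-- ===== LEMMAS AND PROOFS =====

-- A's dictionary, evaluated once (it does not depend on the input).
def atbashDict : PySem.Dict Char Char :=
  (PySem.List.pyRange 0 26 1).foldl (fun d i =>
    (d.insert (PySem.List.pyGetD "abcdefghijklmnopqrstuvwxyz".toList i ' ')
              (PySem.List.pyGetD "abcdefghijklmnopqrstuvwxyz".toList.reverse i ' ')).insert
      (PySem.List.pyGetD "ABCDEFGHIJKLMNOPQRSTUVWXYZ".toList i ' ')
      (PySem.List.pyGetD "ABCDEFGHIJKLMNOPQRSTUVWXYZ".toList.reverse i ' '))
    PySem.Dict.empty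

set_option maxRecDepth 4000 in
lemma atbashDict_eq : atbashDict = PySem.Dict.mk [('a', 'z'), ('A', 'Z'), ('b', 'y'), ('B', 'Y'), ('c', 'x'), ('C', 'X'), ('d', 'w'), ('D', 'W'), ('e', 'v'), ('E', 'V'), ('f', 'u'), ('F', 'U'), ('g', 't'), ('G', 'T'), ('h', 's'), ('H', 'S'), ('i', 'r'), ('I', 'R'), ('j', 'q'), ('J', 'Q'), ('k', 'p'), ('K', 'P'), ('l', 'o'), ('L', 'O'), ('m', 'n'), ('M', 'N'), ('n', 'm'), ('N', 'M'), ('o', 'l'), ('O', 'L'), ('p', 'k'), ('P', 'K'), ('q', 'j'), ('Q', 'J'), ('r', 'i'), ('R', 'I'), ('s', 'h'), ('S', 'H'), ('t', 'g'), ('T', 'G'), ('u', 'f'), ('U', 'F'), ('v', 'e'), ('V', 'E'), ('w', 'd'), ('W', 'D'), ('x', 'c'), ('X', 'C'), ('y', 'b'), ('Y', 'B'), ('z', 'a'), ('Z', 'A')] := by decide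

-- A's lookup with default agrees with B's arithmetic mirror on every character.
set_option maxRecDepth 4000 in
set_option maxHeartbeats 1000000 in
lemma dict_lookup_eq (c : Char) : atbashDict.getD c c = atbashChar c := by
  rw [atbashDict_eq]
  by_cases hl : 97 ≤ c.toNat ∧ c.toNat ≤ 122
  · obtain ⟨h1, h2⟩ := hl
    interval_cases h : c.toNat <;>
      (rw [show c = Char.ofNat c.toNat by rw [Char.ofNat_toNat], h]; decide)
  · by_cases hu : 65 ≤ c.toNat ∧ c.toNat ≤ 90
    · obtain ⟨h1, h2⟩ := hu
      interval_cases h : c.toNat <;>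
        (rw [show c = Char.ofNat c.toNat by rw [Char.ofNat_toNat], h]; decide)
    · have hc : (PySem.Dict.mk [('a', 'z'), ('A', 'Z'), ('b', 'y'), ('B', 'Y'), ('c', 'x'), ('C', 'X'), ('d', 'w'), ('D', 'W'), ('e', 'v'), ('E', 'V'), ('f', 'u'), ('F', 'U'), ('g', 't'), ('G', 'T'), ('h', 's'), ('H', 'S'), ('i', 'r'), ('I', 'R'), ('j', 'q'), ('J', 'Q'), ('k', 'p'), ('K', 'P'), ('l', 'o'), ('L', 'O'), ('m', 'n'), ('M', 'N'), ('n', 'm'), ('N', 'M'), ('o', 'l'), ('O', 'L'), ('p', 'k'), ('P', 'K'), ('q', 'j'), ('Q', 'J'), ('r', 'i'), ('R', 'I'), ('s', 'h'), ('S', 'H'), ('t', 'g'), ('T', 'G'), ('u', 'f'), ('U', 'F'), ('v', 'e'), ('V', 'E'), ('w', 'd'), ('W', 'D'), ('x', 'c'), ('X', 'C'), ('y', 'b'), ('Y', 'B'), ('z', 'a'), ('Z', 'A')]).contains c = false := by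
        rw [PySem.Dict.contains_eq_decide_mem_keys]
        simp only [decide_eq_false_iff_not, PySem.Dict.keys_mk]
        intro hmem
        fin_cases hmem <;> simp_all
      rw [PySem.Dict.getD_of_not_contains _ _ hc]
      unfold atbashChar
      have hle : ∀ (a b : Char), (a ≤ b) ↔ a.toNat ≤ b.toNat := fun a b => by
        rw [Char.le_def]; exact UInt32.le_iff_toNat_le
      rw [if_neg, if_neg]
      · rintro ⟨ha, hb⟩
        exact hu ⟨(hle _ _).mp ha, (hle _ _).mp hb⟩
      · rintro ⟨ha, hb⟩
        exact hl ⟨(hle _ _).mp ha, (hle _ _).mp hb⟩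

lemma foldl_append_map (f : Char → Char) (l acc : List Char) :
    l.foldl (fun a x => a ++ [f x]) acc = acc ++ l.map f := by
  induction l generalizing acc with
  | nil => simp
  | cons x xs ih => simp [List.foldl_cons, ih]

-- ===== VERDICT (by name: the statement is the Claim_ definition above) =====
theorem cifrar_atbash_spec : Claim_equal_cifrar_atbash := by
  intro mensaje _
  show _ = _
  unfold cifrar_atbash cifrar_atbash_alt
  have hd : (PySem.List.slice? "abcdefghijklmnopqrstuvwxyz".toList none none (-1)).getD [] =
      "abcdefghijklmnopqrstuvwxyz".toList.reverse := by
    rw [PySem.List.slice?_none_none_neg_one]; rfl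
  have hd2 : (PySem.List.slice? "ABCDEFGHIJKLMNOPQRSTUVWXYZ".toList none none (-1)).getD [] =
      "ABCDEFGHIJKLMNOPQRSTUVWXYZ".toList.reverse := by
    rw [PySem.List.slice?_none_none_neg_one]; rfl
  simp only [hd, hd2]
  rw [show (PySem.List.pyRange 0 26 1).foldl (fun d i =>
    (d.insert (PySem.List.pyGetD "abcdefghijklmnopqrstuvwxyz".toList i ' ')
              (PySem.List.pyGetD "abcdefghijklmnopqrstuvwxyz".toList.reverse i ' ')).insert
      (PySem.List.pyGetD "ABCDEFGHIJKLMNOPQRSTUVWXYZ".toList i ' ')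
      (PySem.List.pyGetD "ABCDEFGHIJKLMNOPQRSTUVWXYZ".toList.reverse i ' '))
    PySem.Dict.empty = atbashDict from rfl]
  rw [foldl_append_map]
  simp only [dict_lookup_eq, List.nil_append]
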